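-- pv_equiv track=rewrite | github.com/mcyph/char_data | char_data/unicodeset/tokenizer/UnicodeSetParse.py | process_variable
-- ===== SOURCE A (Python) =====
-- from string import ascii_letters
--
-- def process_variable(x, s):
--     """
--     Get the `$variable_name`
--     """
--     SAllowed = set(ascii_letters+'_0123456789')
--
--     L = []
--     x += 1 # Skip the $
--     while 1:
--         # Get the current char
--         try: c = s[x]
--         except: break
--
--         if c in SAllowed:
--             L.append(c)
--         else:
--             break
--         x += 1
--     return x, ''.join(L)
-- ===== SOURCE B (Python) =====
-- import re
--
-- _IDENT = re.compile(r'[A-Za-z0-9_]*')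
--
-- def process_variable(x, s):
--     """
--     Get the `$variable_name`
--     """
--     rest = s[x + 1:]
--     m = _IDENT.match(rest)
--     return x + 1 + m.end(), m.group()
-- ===== Notes on version B (the rewrite author's own statement) =====
-- stated objective: idiomatic
-- what changed: Replaces the explicit char-by-char scan-and-break loop (with try/except for the end of string) by slicing the remainder and matching the identifier prefix with one precompiled regex [A-Za-z0-9_]*, moving the scan into the C regex engine.
-- intended difference: For start positions x+1 < 0 with an identifier character at the wrapped position, A's per-character negative indexing wraps around to the end of the string and can even re-read the string from the front after reaching its end, while B clamps like a Python slice and scans only to the end of the string, which is what a maintainer would expect at an out-of-range position. — e.g. on process_variable(-3, "ab"): A returns (2, "abab"), B returns (0, "ab")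
import Mathlib
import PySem

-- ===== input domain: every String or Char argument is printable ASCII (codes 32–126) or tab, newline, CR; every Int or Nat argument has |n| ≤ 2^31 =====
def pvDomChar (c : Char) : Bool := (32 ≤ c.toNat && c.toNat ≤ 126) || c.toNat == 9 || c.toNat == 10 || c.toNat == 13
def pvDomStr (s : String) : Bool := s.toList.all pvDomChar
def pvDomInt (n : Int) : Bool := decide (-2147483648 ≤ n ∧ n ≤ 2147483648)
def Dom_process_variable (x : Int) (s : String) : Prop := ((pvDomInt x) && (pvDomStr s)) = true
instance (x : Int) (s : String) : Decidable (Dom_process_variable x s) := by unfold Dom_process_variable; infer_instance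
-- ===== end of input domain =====

-- B replaces A's char-by-char scan-and-break loop by slicing the remainder and taking the
-- [A-Za-z0-9_]* prefix in one regex match (idiomatic); on x+1 < 0 A's negative indexing wraps, B clamps like a slice (see D_).

-- ===== PORT A =====
-- set(ascii_letters + '_0123456789'), as the literal list of its distinct characters
def pvSAllowed : List Char :=
  "abcdefghijklmnopqrstuvwxyzABCDEFGHIJKLMNOPQRSTUVWXYZ_0123456789".toList

-- the 'while 1' loop of A: try s[x] (IndexError → break), append while allowed; fuel is an upper
-- bound on the iteration count (proved sufficient below), the loop itself never exhausts it
def pvLoopA (s : List Char) : Int → List Char → Nat → Int × List Char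
  | x, L, 0 => (x, L)
  | x, L, fuel + 1 =>
    match PySem.List.pyGet? s x with
    | none => (x, L)
    | some c => if pvSAllowed.contains c then pvLoopA s (x + 1) (L ++ [c]) fuel else (x, L)

def process_variable (x : Int) (s : String) : Int × String :=
  let r := pvLoopA s.toList (x + 1) [] (2 * s.toList.length + 2)
  (r.1, String.ofList r.2)

-- ===== PORT B =====
-- the regex class [A-Za-z0-9_]
def identChar (c : Char) : Bool :=
  ('A' ≤ c && c ≤ 'Z') || ('a' ≤ c && c ≤ 'z') || ('0' ≤ c && c ≤ '9') || c == '_'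

def process_variable_alt (x : Int) (s : String) : Int × String :=
  let rest := PySem.List.slice s.toList (some (x + 1)) none   -- s[x+1:]
  let m := rest.takeWhile identChar                           -- re.match(r'[A-Za-z0-9_]*', rest)
  (x + 1 + (m.length : Int), String.ofList m)

-- ===== PRECONDITION & SPEC =====
-- For start positions x+1 < 0, A's per-character negative indexing wraps around to the end of the
-- string (and can re-read it from the front after reaching the end), while B clamps like a Python
-- slice and scans only to the end — the value a maintainer would expect at an out-of-range position.
def D_process_variable (x : Int) (s : String) : Prop :=
  x + 1 < 0 ∧ pvSAllowed.contains (s.toList.headD '!') ∧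
    (x + 1 < -(s.toList.length : Int) ∨
      (s.toList.drop ((s.toList.length : Int) + x + 1).toNat).all pvSAllowed.contains)
instance (x : Int) (s : String) : Decidable (D_process_variable x s) := by
  unfold D_process_variable; infer_instance

def Spec_process_variable (x : Int) (s : String) (out : Int × String) : Prop :=
  ¬ D_process_variable x s → out = process_variable_alt x s
instance (x : Int) (s : String) (out : Int × String) : Decidable (Spec_process_variable x s out) := by
  unfold Spec_process_variable; infer_instance

def pvDiffWitness_process_variable : Int × String := (-3, "ab")
def pvDiffWitnessOut_process_variable : (Int × String) × (Int × String) := ((2, "abab"), (0, "ab"))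

-- ===== CLAIM (what is proved, stated in full; the proofs are below) =====
def Claim_unchanged_process_variable : Prop := ∀ (x : Int) (s : String), Dom_process_variable x s → Spec_process_variable x s (process_variable x s)
def Claim_changed_process_variable : Prop := Dom_process_variable (pvDiffWitness_process_variable.1) (pvDiffWitness_process_variable.2) ∧ D_process_variable (pvDiffWitness_process_variable.1) (pvDiffWitness_process_variable.2) ∧ process_variable (pvDiffWitness_process_variable.1) (pvDiffWitness_process_variable.2) = pvDiffWitnessOut_process_variable.1 ∧ process_variable_alt (pvDiffWitness_process_variable.1) (pvDiffWitness_process_variable.2) = pvDiffWitnessOut_process_variable.2 ∧ pvDiffWitnessOut_process_variable.1 ≠ pvDiffWitnessOut_process_variable.2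
def Claim_exact_process_variable : Prop := ∀ (x : Int) (s : String), Dom_process_variable x s → D_process_variable x s → process_variable x s ≠ process_variable_alt x s

-- ===== LEMMAS AND PROOFS =====

-- membership in A's allowed set coincides with B's regex class on (at least) ASCII codepoints
set_option maxRecDepth 4000 in
lemma key_ident : ∀ k < 128, pvSAllowed.contains (Char.ofNat k) = identChar (Char.ofNat k) := by decide

lemma contains_eq_identChar (c : Char) (h : pvDomChar c = true) :
    pvSAllowed.contains c = identChar c := by
  have hk : c.toNat < 128 := by
    unfold pvDomChar at h
    simp only [Bool.or_eq_true, Bool.and_eq_true, decide_eq_true_eq, beq_iff_eq] at h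
    omega
  have := key_ident c.toNat hk
  simpa [Char.ofNat_toNat] using this

-- A's loop started at a nonnegative index j scans drop j and appends its identifier prefix
lemma loopA_nonneg (l : List Char) (hD : ∀ c ∈ l, pvDomChar c = true)
    (j : Nat) (L : List Char) (fuel : Nat) (hf : l.length + 1 ≤ fuel + j) :
    pvLoopA l (j : Int) L fuel =
      ((j : Int) + (((l.drop j).takeWhile identChar).length : Int),
       L ++ (l.drop j).takeWhile identChar) := by
  induction fuel generalizing j L with
  | zero =>
    have hj : l.length < j := by omega
    have hdrop : l.drop j = [] := List.drop_eq_nil_of_le (by omega)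
    simp [pvLoopA, hdrop]
  | succ f ih =>
    by_cases hj : j < l.length
    · have hget : PySem.List.pyGet? l (j : Int) = some l[j] := by
        simp [PySem.List.pyGet?_natCast, List.getElem?_eq_getElem hj]
      have hdrop : l.drop j = l[j] :: l.drop (j + 1) := List.drop_eq_getElem_cons hj
      have hcc : pvSAllowed.contains l[j] = identChar l[j] :=
        contains_eq_identChar _ (hD _ (List.getElem_mem hj))
      by_cases hid : identChar l[j] = true
      · have := ih (j + 1) (L ++ [l[j]]) (by omega)
        simp only [pvLoopA, hget, hcc, hid, if_true]
        rw [show ((j : Int) + 1) = ((j + 1 : Nat) : Int) by push_cast; ring, this,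
          hdrop, List.takeWhile_cons_of_pos hid]
        simp only [List.length_cons, List.append_assoc, List.singleton_append,
          Prod.mk.injEq]
        exact ⟨by push_cast; ring, trivial⟩
      · simp only [pvLoopA, hget, hcc, hid]
        rw [hdrop, List.takeWhile_cons_of_neg (by simp [hid])]
        simp
    · have hjl : l.length ≤ j := Nat.le_of_not_lt hj
      have hget : PySem.List.pyGet? l (j : Int) = none := by
        simp [PySem.List.pyGet?_natCast, List.getElem?_eq_none_iff.mpr hjl]
      have hdrop : l.drop j = [] := List.drop_eq_nil_of_le hjl
      simp [pvLoopA, hget, hdrop]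

-- A's loop started at a negative in-range index x0 scans the tail from position len+x0; if the
-- whole tail is identifier chars the loop wraps and continues at index 0, otherwise it stops
lemma loopA_neg (l : List Char) (hD : ∀ c ∈ l, pvDomChar c = true)
    (x0 : Int) (L : List Char) (fuel : Nat)
    (h1 : -(l.length : Int) ≤ x0) (h2 : x0 < 0) (hf : (-x0).toNat ≤ fuel) :
    pvLoopA l x0 L fuel =
      (if ((l.drop (l.length + x0).toNat).takeWhile identChar).length
          = l.length - (l.length + x0).toNat then
        pvLoopA l 0 (L ++ (l.drop (l.length + x0).toNat).takeWhile identChar)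
          (fuel - (l.length - (l.length + x0).toNat))
      else
        (x0 + (((l.drop (l.length + x0).toNat).takeWhile identChar).length : Int),
         L ++ (l.drop (l.length + x0).toNat).takeWhile identChar)) := by
  induction fuel generalizing x0 L with
  | zero => omega
  | succ f ih =>
    obtain ⟨k, hx0, hk0⟩ : ∃ k : Nat, x0 = -(k : Int) ∧ 0 < k :=
      ⟨(-x0).toNat, by omega, by omega⟩
    have hfk : k ≤ f + 1 := by omega
    have hkn : k ≤ l.length := by omega
    have hp : (l.length + x0).toNat = l.length - k := by omega
    have hplt : l.length - k < l.length := by omega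
    have hget : PySem.List.pyGet? l x0 = some l[l.length - k] := by
      rw [hx0, PySem.List.pyGet?_neg_natCast l k hk0 hkn,
        List.getElem?_eq_getElem hplt]
    have hdrop : l.drop (l.length - k) = l[l.length - k] :: l.drop (l.length - k + 1) :=
      List.drop_eq_getElem_cons hplt
    have hcc : pvSAllowed.contains l[l.length - k] = identChar l[l.length - k] :=
      contains_eq_identChar _ (hD _ (List.getElem_mem hplt))
    by_cases hid : identChar l[l.length - k] = true
    · by_cases hk1 : k = 1
      · -- last negative index: next index is 0
        have hx0' : x0 = -1 := by omega
        have hdrop1 : l.drop (l.length - k) = [l[l.length - k]] := by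
          rw [hdrop, List.drop_eq_nil_of_le (by omega)]
        simp only [pvLoopA, hget, hcc, hid, if_true, hp, hdrop1,
          List.takeWhile_cons_of_pos hid, List.takeWhile_nil, List.length_cons,
          List.length_nil]
        rw [if_pos (by omega)]
        rw [show x0 + 1 = (0 : Int) by omega]
        have : f + 1 - (l.length - (l.length - k)) = f := by omega
        rw [this]
      · -- still negative after the step
        have hk1' : 2 ≤ k := by omega
        have h2' : x0 + 1 < 0 := by omega
        have := ih (x0 + 1) (L ++ [l[l.length - k]]) (by omega) h2' (by omega)
        have hp' : (l.length + (x0 + 1)).toNat = l.length - k + 1 := by omega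
        rw [hp'] at this
        simp only [pvLoopA, hget, hcc, hid, if_true, hp]
        rw [this, hdrop, List.takeWhile_cons_of_pos hid]
        by_cases hall : ((l.drop (l.length - k + 1)).takeWhile identChar).length
            = l.length - (l.length - k + 1)
        · rw [if_pos hall, if_pos (by simp [List.length_cons]; omega)]
          have : f - (l.length - (l.length - k + 1)) = f + 1 - (l.length - (l.length - k)) := by
            omega
          rw [this]
          simp [List.append_assoc]
        · rw [if_neg hall, if_neg (by simp [List.length_cons]; omega)]
          rw [Prod.mk.injEq]
          exact ⟨by simp only [List.length_cons]; push_cast; ring, by simp⟩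
    · simp only [pvLoopA, hget, hcc, hid, hp]
      rw [hdrop, List.takeWhile_cons_of_neg (by simp [hid])]
      simp only [List.length_nil]
      have hcond : ¬ ((0 : Nat) = l.length - (l.length - k)) := by omega
      rw [if_neg hcond]
      simp

-- if the loop's takeWhile consumed the whole tail, every char of the tail is an identifier char
lemma takeWhile_all_of_length (l : List Char) (p : Nat)
    (h : ((l.drop p).takeWhile identChar).length = l.length - p) :
    (l.drop p).all identChar = true := by
  have heq : (l.drop p).takeWhile identChar = l.drop p :=
    (List.takeWhile_prefix identChar).eq_of_length (by rw [h, List.length_drop])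
  exact List.all_eq_true.mpr (List.takeWhile_eq_self_iff.mp heq)

-- B's value, spelled out on the character list
lemma alt_eval (x : Int) (s : String) :
    process_variable_alt x s =
      (x + 1 + (((PySem.List.slice s.toList (some (x + 1)) none).takeWhile identChar).length : Int),
       String.ofList ((PySem.List.slice s.toList (some (x + 1)) none).takeWhile identChar)) := rfl

theorem process_variable_spec : Claim_unchanged_process_variable := by
  intro x s hDom
  unfold Spec_process_variable
  intro hnD
  have hD : ∀ c ∈ s.toList, pvDomChar c = true := by
    unfold Dom_process_variable pvDomStr at hDom
    simp only [Bool.and_eq_true, List.all_eq_true] at hDom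
    exact hDom.2
  rw [alt_eval]
  show (let r := pvLoopA s.toList (x + 1) [] (2 * s.toList.length + 2); (r.1, String.ofList r.2)) = _
  by_cases hx : 0 ≤ x + 1
  · -- nonnegative start: both scan drop (x+1)
    obtain ⟨j, hj⟩ : ∃ j : Nat, x + 1 = (j : Int) := ⟨(x + 1).toNat, by omega⟩
    rw [hj, loopA_nonneg s.toList hD j [] _ (by omega),
      PySem.List.slice_from s.toList (by omega : (0 : Int) ≤ (j : Int))]
    simp
  · by_cases hr : -(s.toList.length : Int) ≤ x + 1
    · -- negative in-range start
      obtain ⟨k, hx0, hk0⟩ : ∃ k : Nat, x + 1 = -(k : Int) ∧ 0 < k :=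
        ⟨(-(x + 1)).toNat, by omega, by omega⟩
      have hkn : k ≤ s.toList.length := by omega
      have hp : ((s.toList.length : Int) + (x + 1)).toNat = s.toList.length - k := by omega
      have hslice : PySem.List.slice s.toList (some (x + 1)) none
          = s.toList.drop (s.toList.length - k) := by
        rw [hx0, PySem.List.slice_some_none, PySem.List.clampIdx_neg_natCast _ _ hk0]
      rw [loopA_neg s.toList hD (x + 1) [] _ hr (by omega) (by omega), hp, hslice]
      by_cases hall : ((s.toList.drop (s.toList.length - k)).takeWhile identChar).length
          = s.toList.length - (s.toList.length - k)
      · -- the whole tail is identifier chars: A wraps to index 0; ¬D forces a non-ident head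
        rw [if_pos hall]
        have hne : s.toList ≠ [] := by
          intro h; rw [h] at hkn; simp at hkn; omega
        have hp2 : ((s.toList.length : Int) + x + 1).toNat = s.toList.length - k := by omega
        have hheadmem : s.toList.headD '!' ∈ s.toList := by
          cases h : s.toList with
          | nil => exact absurd h hne
          | cons a l' => simp
        have hhead : ¬ identChar (s.toList.headD '!') = true := by
          intro hh
          refine hnD ⟨by omega, ?_, Or.inr ?_⟩
          · rw [contains_eq_identChar _ (hD _ hheadmem)]; exact hh
          · rw [hp2]
            have hall' := takeWhile_all_of_length s.toList (s.toList.length - k) hall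
            refine List.all_eq_true.mpr fun a ha => ?_
            rw [contains_eq_identChar a (hD a (List.mem_of_mem_drop ha))]
            exact List.all_eq_true.mp hall' a ha
        have h0 := loopA_nonneg s.toList hD 0
          ([] ++ (s.toList.drop (s.toList.length - k)).takeWhile identChar)
          (2 * s.toList.length + 2 - (s.toList.length - (s.toList.length - k))) (by omega)
        rw [Nat.cast_zero] at h0
        rw [h0]
        obtain ⟨c, l', hl⟩ : ∃ c l', s.toList = c :: l' := by
          cases h : s.toList with
          | nil => exact absurd h hne
          | cons c l' => exact ⟨c, l', rfl⟩
        have hc : identChar c ≠ true := by rw [hl] at hhead; exact hhead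
        have htw : s.toList.takeWhile identChar = [] := by
          rw [hl, List.takeWhile_cons_of_neg (by simpa using hc)]
        simp only [List.drop_zero, htw, List.length_nil, List.append_nil, List.nil_append]
        rw [Prod.mk.injEq]
        constructor
        · have : ((s.toList.drop (s.toList.length - k)).takeWhile identChar).length = k := by
            omega
          rw [this]; omega
        · rfl
      · -- the scan stops inside the tail: identical results
        rw [if_neg hall]
        simp
    · -- start before the beginning of the string: A's lookup raises at once
      have hget : PySem.List.pyGet? s.toList (x + 1) = none := by
        rw [PySem.List.pyGet?_eq_none_iff]
        simp only [PySem.Raise.InRange]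
        omega
      have hclamp : PySem.List.clampIdx s.toList.length (x + 1) = 0 := by
        obtain ⟨k, hx0, hk0⟩ : ∃ k : Nat, x + 1 = -(k : Int) ∧ 0 < k :=
          ⟨(-(x + 1)).toNat, by omega, by omega⟩
        rw [hx0, PySem.List.clampIdx_neg_natCast _ _ hk0]
        omega
      have htw : s.toList.takeWhile identChar = [] := by
        cases h : s.toList with
        | nil => simp
        | cons c l' =>
          have hcm : c ∈ s.toList := by simp [h]
          have hhead : ¬ identChar c = true := by
            intro hh
            refine hnD ⟨by omega, ?_, Or.inl (by omega)⟩
            rw [h]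
            show pvSAllowed.contains c = true
            rw [contains_eq_identChar c (hD c hcm)]
            exact hh
          exact List.takeWhile_cons_of_neg (by simpa using hhead)
      rw [show (2 * s.toList.length + 2) = (2 * s.toList.length + 1) + 1 from rfl]
      simp only [pvLoopA, hget, PySem.List.slice_some_none, hclamp, List.drop_zero, htw]
      simp

theorem process_variable_changed : Claim_changed_process_variable := by
  unfold Claim_changed_process_variable; decide

theorem process_variable_tight : Claim_exact_process_variable := by
  intro x s hDom hd
  obtain ⟨hx, hhead, hdisj⟩ := hd
  have hne : s.toList ≠ [] := by
    intro h
    rw [h] at hhead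
    simp [pvSAllowed] at hhead
  have hD : ∀ c ∈ s.toList, pvDomChar c = true := by
    unfold Dom_process_variable pvDomStr at hDom
    simp only [Bool.and_eq_true, List.all_eq_true] at hDom
    exact hDom.2
  obtain ⟨c, l', hl⟩ : ∃ c l', s.toList = c :: l' := by
    cases h : s.toList with
    | nil => exact absurd h hne
    | cons c l' => exact ⟨c, l', rfl⟩
  have hcm : c ∈ s.toList := by simp [hl]
  have hc : identChar c = true := by
    rw [← contains_eq_identChar c (hD c hcm)]
    rw [hl] at hhead
    exact hhead
  have htw : ∃ t, s.toList.takeWhile identChar = c :: t := by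
    rw [hl, List.takeWhile_cons_of_pos hc]; exact ⟨_, rfl⟩
  rw [alt_eval]
  show (let r := pvLoopA s.toList (x + 1) [] (2 * s.toList.length + 2); (r.1, String.ofList r.2)) ≠ _
  by_cases hr : -(s.toList.length : Int) ≤ x + 1
  · -- in-range negative start and an all-identifier tail: A wraps past the end, B stops there
    obtain ⟨k, hx0, hk0⟩ : ∃ k : Nat, x + 1 = -(k : Int) ∧ 0 < k :=
      ⟨(-(x + 1)).toNat, by omega, by omega⟩
    have hkn : k ≤ s.toList.length := by omega
    have hp : ((s.toList.length : Int) + (x + 1)).toNat = s.toList.length - k := by omega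
    have hall : ((s.toList.drop (s.toList.length - k)).takeWhile identChar).length
        = s.toList.length - (s.toList.length - k) := by
      rcases hdisj with h | h
      · omega
      · have hp2 : ((s.toList.length : Int) + x + 1).toNat = s.toList.length - k := by omega
        rw [hp2] at h
        have heq : (s.toList.drop (s.toList.length - k)).takeWhile identChar
            = s.toList.drop (s.toList.length - k) :=
          List.takeWhile_eq_self_iff.mpr (fun a ha => by
            rw [← contains_eq_identChar a (hD a (List.mem_of_mem_drop ha))]
            exact List.all_eq_true.mp h a ha)
        rw [heq, List.length_drop]
    have hslice : PySem.List.slice s.toList (some (x + 1)) none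
        = s.toList.drop (s.toList.length - k) := by
      rw [hx0, PySem.List.slice_some_none, PySem.List.clampIdx_neg_natCast _ _ hk0]
    have h0 := loopA_nonneg s.toList hD 0
      ([] ++ (s.toList.drop (s.toList.length - k)).takeWhile identChar)
      (2 * s.toList.length + 2 - (s.toList.length - (s.toList.length - k))) (by omega)
    rw [Nat.cast_zero] at h0
    rw [loopA_neg s.toList hD (x + 1) [] _ hr (by omega) (by omega), hp, if_pos hall, h0, hslice]
    obtain ⟨t, ht⟩ := htw
    simp only [List.drop_zero, ht]
    intro hcontr
    have h1 := congrArg Prod.fst hcontr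
    simp only at h1
    -- A's first component is (length of c :: t) ≥ 1; B's is x + 1 + (length of the tail) = 0
    have hlen : ((s.toList.drop (s.toList.length - k)).takeWhile identChar).length = k := by
      omega
    rw [hlen] at h1
    simp only [List.length_cons] at h1
    omega
  · -- start before the beginning: A returns the empty string, B a nonempty identifier
    have hget : PySem.List.pyGet? s.toList (x + 1) = none := by
      rw [PySem.List.pyGet?_eq_none_iff]
      simp only [PySem.Raise.InRange]
      omega
    have hclamp : PySem.List.clampIdx s.toList.length (x + 1) = 0 := by
      obtain ⟨k, hx0, hk0⟩ : ∃ k : Nat, x + 1 = -(k : Int) ∧ 0 < k :=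
        ⟨(-(x + 1)).toNat, by omega, by omega⟩
      rw [hx0, PySem.List.clampIdx_neg_natCast _ _ hk0]
      omega
    obtain ⟨t, ht⟩ := htw
    rw [show (2 * s.toList.length + 2) = (2 * s.toList.length + 1) + 1 from rfl]
    simp only [pvLoopA, hget, PySem.List.slice_some_none, hclamp, List.drop_zero, ht]
    intro hcontr
    have h2 := congrArg (fun p => p.2.toList) hcontr
    simp only [String.toList_ofList] at h2
    simp at h2
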